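-- pv_equiv track=rewrite | github.com/MMMZZZZ/Jellyfin-Migrator | jellyfin_id_scanner.py | get_id_candidates
-- ===== SOURCE A (Python) =====
-- def get_id_candidates(s):
--     result = ""
--     if type(s) is bytes:
--         result = "".join(chr(c) if c in b"0123456789abcdef-" else " " for c in s)
--     elif type(s) is str:
--         result = "".join(c if c in "0123456789abcdef-" else " " for c in s)
--
--     # check if it's a pure id or an id embedded within other data.
--     column_type = "embedded"
--     if result == s:
--         column_type = "pure"
--
--     result = result.split(" ")
--     result = {piece for piece in result if len(piece) >= 32}
--     return column_type, result
-- ===== SOURCE B (Python) =====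
-- import re
--
-- _HEX_RUN_STR = re.compile(r'[0-9a-f-]+')
-- _HEX_RUN_BYTES = re.compile(rb'[0-9a-f-]+')
-- _PURE_STR = re.compile(r'[0-9a-f\- ]*')
--
-- def get_id_candidates(s):
--     if type(s) is bytes:
--         # bytes never compare equal to the masked str, so always "embedded"
--         pieces = (p.decode() for p in _HEX_RUN_BYTES.findall(s))
--         return "embedded", {p for p in pieces if len(p) >= 32}
--     if type(s) is str:
--         column_type = "pure" if _PURE_STR.fullmatch(s) else "embedded"
--         return column_type, {p for p in _HEX_RUN_STR.findall(s) if len(p) >= 32}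
--     return "embedded", set()
-- ===== Notes on version B (the rewrite author's own statement) =====
-- stated objective: idiomatic
-- what changed: Replaces A's mask-every-char-into-spaces + split-on-single-space + filter pipeline with a direct regex scan for maximal [0-9a-f-]+ runs (a takeWhile/dropWhile recursion in the port) and a one-pass character-class test for the pure/embedded classification.
import Mathlib
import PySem

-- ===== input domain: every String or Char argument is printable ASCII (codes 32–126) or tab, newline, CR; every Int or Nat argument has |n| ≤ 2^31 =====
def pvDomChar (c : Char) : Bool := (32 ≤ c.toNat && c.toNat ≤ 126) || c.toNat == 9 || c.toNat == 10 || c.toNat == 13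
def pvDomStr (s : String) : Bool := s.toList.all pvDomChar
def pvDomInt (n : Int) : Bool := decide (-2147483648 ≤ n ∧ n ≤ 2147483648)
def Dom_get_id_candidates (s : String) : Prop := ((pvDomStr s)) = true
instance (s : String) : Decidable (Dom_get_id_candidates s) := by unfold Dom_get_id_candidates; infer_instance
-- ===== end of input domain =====

-- B replaces A's mask-then-split-on-single-spaces-then-filter pipeline by a direct maximal-run
-- scan (regex findall in Python, a takeWhile/dropWhile recursion here) plus a one-pass character
-- test for the "pure" classification; same return value, simpler/more idiomatic (objective: idiomatic).

-- ===== PORT A =====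
-- 'c in "0123456789abcdef-"' as list membership on the literal characters
def pvHexChars : List Char := ['0','1','2','3','4','5','6','7','8','9','a','b','c','d','e','f','-']

def get_id_candidates (s : String) : String × List String :=
  -- result = "".join(c if c in "0123456789abcdef-" else " " for c in s)   (str branch; input is str)
  let result : String := String.ofList (s.toList.map (fun c => if c ∈ pvHexChars then c else ' '))
  -- column_type = "embedded"; if result == s: column_type = "pure"
  let column_type : String := if result = s then "pure" else "embedded"
  -- result = result.split(" ")
  let pieces : List String := (PySem.Chars.splitOn result.toList [' ']).map String.ofList
  -- {piece for piece in result if len(piece) >= 32}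
  (column_type, PySem.Set.ofList (pieces.filter (fun p => 32 ≤ PySem.Str.len p)))

-- ===== PORT B =====
-- character class [0-9a-f-]
def pvIsHex (c : Char) : Bool :=
  c ∈ ['0','1','2','3','4','5','6','7','8','9','a','b','c','d','e','f','-']

-- re.findall(r'[0-9a-f-]+', s): the maximal runs of hex/dash characters, in order
def pvHexRuns (cs : List Char) : List (List Char) :=
  match cs with
  | [] => []
  | c :: rest =>
    if pvIsHex c then
      (c :: rest.takeWhile pvIsHex) :: pvHexRuns (rest.dropWhile pvIsHex)
    else
      pvHexRuns rest
termination_by cs.length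
decreasing_by
  · simpa using Nat.lt_succ_of_le (List.length_dropWhile_le _ _)
  · simp

def get_id_candidates_alt (s : String) : String × List String :=
  -- "pure" iff re.fullmatch(r'[0-9a-f\- ]*', s), i.e. every char is hex/dash/space
  let column_type : String :=
    if s.toList.all (fun c => pvIsHex c || c == ' ') then "pure" else "embedded"
  let pieces : List String := (pvHexRuns s.toList).map String.ofList
  (column_type, PySem.Set.ofList (pieces.filter (fun p => 32 ≤ (p.toList.length : Int))))

-- ===== PRECONDITION & SPEC =====
def Spec_get_id_candidates (s : String) (out : String × List String) : Prop := out = get_id_candidates_alt s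
instance (s : String) (out : String × List String) : Decidable (Spec_get_id_candidates s out) := by unfold Spec_get_id_candidates; infer_instance

-- ===== CLAIM (what is proved, stated in full; the proofs are below) =====
def Claim_equal_get_id_candidates : Prop := ∀ (s : String), Dom_get_id_candidates s → Spec_get_id_candidates s (get_id_candidates s)

-- ===== LEMMAS AND PROOFS =====

-- the masking function of A
def pvMask (c : Char) : Char := if c ∈ pvHexChars then c else ' '

-- a simple accumulator splitter equivalent to Chars.splitOn · [' ']
def pvSplitSp : List Char → List Char → List (List Char)
  | [], cur => [cur.reverse]
  | c :: rest, cur => if c = ' ' then cur.reverse :: pvSplitSp rest [] else pvSplitSp rest (c :: cur)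

theorem pvGo_eq (l : List Char) : ∀ (fuel : Nat), l.length ≤ fuel →
    ∀ (cur : List Char) (acc : List (List Char)),
    PySem.Chars.splitOn.go [' '] fuel l cur acc = acc.reverse ++ pvSplitSp l cur := by
  induction l with
  | nil =>
    intro fuel _ cur acc
    cases fuel <;> simp [PySem.Chars.splitOn.go, pvSplitSp]
  | cons c rest ih =>
    intro fuel hf cur acc
    cases fuel with
    | zero => simp at hf
    | succ n =>
      simp only [List.length_cons, Nat.succ_le_succ_iff] at hf
      by_cases hc : c = ' '
      · subst hc
        rw [show PySem.Chars.splitOn.go [' '] (n+1) (' ' :: rest) cur acc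
              = PySem.Chars.splitOn.go [' '] n rest [] (cur.reverse :: acc) by
            simp [PySem.Chars.splitOn.go, List.isPrefixOf]]
        rw [ih n hf [] (cur.reverse :: acc)]
        simp [pvSplitSp]
      · rw [show PySem.Chars.splitOn.go [' '] (n+1) (c :: rest) cur acc
              = PySem.Chars.splitOn.go [' '] n rest (c :: cur) acc by
            simp [PySem.Chars.splitOn.go, List.isPrefixOf]
            exact fun h => absurd h.symm hc]
        rw [ih n hf (c :: cur) acc]
        simp [pvSplitSp, hc]

theorem pvSplitOn_eq (l : List Char) :
    PySem.Chars.splitOn l [' '] = pvSplitSp l [] := by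
  rw [PySem.Chars.splitOn, pvGo_eq l (l.length + 1) (Nat.le_succ _) [] []]
  simp

theorem pvMask_hex {c : Char} (h : pvIsHex c = true) : pvMask c = c := by
  simp [pvIsHex] at h
  simp [pvMask, pvHexChars]
  rcases h with h|h|h|h|h|h|h|h|h|h|h|h|h|h|h|h|h <;> simp [h]

theorem pvMask_not_hex {c : Char} (h : pvIsHex c = false) : pvMask c = ' ' := by
  simp [pvIsHex] at h
  simp [pvMask, pvHexChars]
  obtain ⟨h0,h1,h2,h3,h4,h5,h6,h7,h8,h9,ha,hb,hc,hd,he,hf,hm⟩ := h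
  simp [h0,h1,h2,h3,h4,h5,h6,h7,h8,h9,ha,hb,hc,hd,he,hf,hm]

theorem pvHex_ne_space {c : Char} (h : pvIsHex c = true) : c ≠ ' ' := by
  simp [pvIsHex] at h
  rcases h with h|h|h|h|h|h|h|h|h|h|h|h|h|h|h|h|h <;> simp [h]

-- consuming a run: pvSplitSp on a masked tail with a nonempty current piece
theorem pvSplit_run (cs : List Char) : ∀ (cur : List Char), cur ≠ [] →
    (pvSplitSp (cs.map pvMask) cur).filter (· ≠ []) =
      (cur.reverse ++ cs.takeWhile pvIsHex) ::
        ((pvSplitSp ((cs.dropWhile pvIsHex).map pvMask) []).filter (· ≠ [])) := by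
  induction cs with
  | nil =>
    intro cur hcur
    simp [pvSplitSp, hcur]
  | cons c rest ih =>
    intro cur hcur
    by_cases hc : pvIsHex c
    · have hmc := pvMask_hex hc
      have hcs := pvHex_ne_space hc
      simp only [List.map_cons, hmc, pvSplitSp, if_neg hcs]
      rw [ih (c :: cur) (by simp)]
      simp [List.takeWhile_cons, List.dropWhile_cons, hc]
    · have hmc := pvMask_not_hex (by simpa using hc)
      simp only [List.map_cons, hmc, pvSplitSp]
      rw [if_pos trivial, List.filter_cons]
      simp only [List.takeWhile_cons, List.dropWhile_cons]
      simp [hc, hcur]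
      rw [hmc]
      simp [pvSplitSp]

-- the key characterisation: nonempty pieces of A's split are exactly B's runs
theorem pvSplit_eq_runs (cs : List Char) :
    (pvSplitSp (cs.map pvMask) []).filter (· ≠ []) = pvHexRuns cs := by
  induction hn : cs.length using Nat.strong_induction_on generalizing cs with
  | _ n ih =>
    match cs, hn with
    | [], _ => simp [pvSplitSp, pvHexRuns]
    | c :: rest, hn =>
      by_cases hc : pvIsHex c
      · have hmc := pvMask_hex hc
        have hcs := pvHex_ne_space hc
        simp only [List.map_cons, hmc, pvSplitSp, if_neg hcs]
        rw [pvSplit_run rest [c] (by simp)]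
        rw [ih ((rest.dropWhile pvIsHex).length)
              (by rw [← hn]; simpa using Nat.lt_succ_of_le (List.length_dropWhile_le _ _))
              (rest.dropWhile pvIsHex) rfl]
        simp [pvHexRuns, hc]
      · have hmc := pvMask_not_hex (by simpa using hc)
        simp only [List.map_cons, hmc, pvSplitSp]
        rw [if_pos trivial, List.filter_cons]
        simp only [List.reverse_nil]
        rw [ih rest.length (by rw [← hn]; simp) rest rfl]
        simp [pvHexRuns, hc]

-- the length-≥32 filter ignores empty pieces, so both pipelines filter to the same list
theorem pvPieces_eq (cs : List Char) :
    ((PySem.Chars.splitOn (cs.map pvMask) [' ']).filter (fun p => 32 ≤ (p.length : Int))) =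
      (pvHexRuns cs).filter (fun p => 32 ≤ (p.length : Int)) := by
  rw [pvSplitOn_eq, ← pvSplit_eq_runs cs, List.filter_filter]
  apply List.filter_congr
  intro p _
  by_cases hp : 32 ≤ (p.length : Int)
  · have : p ≠ [] := by
      intro h; subst h; simp at hp
    simp [hp, this]
  · simp [hp]

-- the "pure" tests agree: the masked string equals s iff every char is hex/dash/space
theorem pvPure_iff (cs : List Char) :
    (cs.map pvMask = cs) ↔ (cs.all (fun c => pvIsHex c || c == ' ') = true) := by
  induction cs with
  | nil => simp
  | cons c rest ih =>
    simp only [List.map_cons, List.all_cons, Bool.and_eq_true, List.cons.injEq, ← ih]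
    constructor
    · rintro ⟨h1, h2⟩
      refine ⟨?_, h2⟩
      by_cases hc : pvIsHex c
      · simp [hc]
      · have := pvMask_not_hex (by simpa using hc)
        rw [this] at h1
        simp [← h1]
    · rintro ⟨h1, h2⟩
      refine ⟨?_, h2⟩
      rcases Bool.or_eq_true .. |>.mp h1 with h | h
      · exact pvMask_hex h
      · have hc : c = ' ' := by simpa using h
        subst hc
        by_cases hx : pvIsHex ' '
        · exact pvMask_hex hx
        · exact pvMask_not_hex (by simpa using hx)

theorem get_id_candidates_spec' (s : String) :
    get_id_candidates s = get_id_candidates_alt s := by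
  unfold get_id_candidates get_id_candidates_alt
  have hmask : ∀ c, (if c ∈ pvHexChars then c else ' ') = pvMask c := fun c => rfl
  simp only [hmask]
  refine Prod.ext ?_ ?_
  · -- column_type
    simp only
    have : (String.ofList (s.toList.map pvMask) = s) ↔
        (s.toList.all (fun c => pvIsHex c || c == ' ') = true) := by
      rw [← pvPure_iff s.toList]
      constructor
      · intro h
        have := congrArg String.toList h
        simpa using this
      · intro h
        rw [h]
        simp
    by_cases h : String.ofList (s.toList.map pvMask) = s
    · rw [if_pos h, if_pos (this.mp h)]
    · rw [if_neg h, if_neg (fun hh => h (this.mpr hh))]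
  · -- the candidate set
    simp only
    congr 1
    have hlen : ∀ (p : List Char), PySem.Str.len (String.ofList p) = (p.length : Int) := by
      intro p; simp [PySem.Str.len_eq]
    rw [List.filter_map, List.filter_map]
    congr 1
    have h1 : ((fun p => decide (32 ≤ PySem.Str.len p)) ∘ String.ofList)
        = fun p : List Char => decide (32 ≤ (p.length : Int)) := by
      funext p; simp [Function.comp]
    have h2 : ((fun p => decide (32 ≤ ((p.toList.length : Int)))) ∘ String.ofList)
        = fun p : List Char => decide (32 ≤ (p.length : Int)) := by
      funext p; simp [Function.comp]
    rw [h1, h2]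
    have := pvPieces_eq s.toList
    simpa using this

-- ===== VERDICT (by name: the statement is the Claim_ definition above) =====
theorem get_id_candidates_spec : Claim_equal_get_id_candidates := by
  intro s _
  unfold Spec_get_id_candidates
  exact get_id_candidates_spec' s
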